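-- pv_equiv track=rewrite | github.com/siddevkota/srs-techdoc-agent | backend/core/srs_loader.py | get_text_stats
-- ===== SOURCE A (Python) =====
-- def get_text_stats(text: str) -> dict:
--     """Get statistics about extracted text."""
--     lines = text.split('\n')
--     words = text.split()
--
--     return {
--         "char_count": len(text),
--         "word_count": len(words),
--         "line_count": len(lines),
--         "non_empty_lines": len([line for line in lines if line.strip()]),
--     }
-- ===== SOURCE B (Python) =====
-- def get_text_stats(text: str) -> dict:
--     """Get statistics about extracted text (single counting pass)."""
--     word_count = 0
--     line_count = 1
--     non_empty_lines = 0
--     prev_space = True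
--     line_has_content = False
--     for c in text:
--         sp = c.isspace()
--         if not sp:
--             if prev_space:
--                 word_count += 1
--             line_has_content = True
--         prev_space = sp
--         if c == '\n':
--             line_count += 1
--             if line_has_content:
--                 non_empty_lines += 1
--             line_has_content = False
--     if line_has_content:
--         non_empty_lines += 1
--     return {
--         "char_count": len(text),
--         "word_count": word_count,
--         "line_count": line_count,
--         "non_empty_lines": non_empty_lines,
--     }
-- ===== Notes on version B (the rewrite author's own statement) =====
-- stated objective: alternative
-- what changed: Replaces the three list-building library passes (the line split, the whitespace word split, and a strip()-filter comprehension) by one counting scan over the characters that maintains word/line/non-empty-line counters with two boolean flags and allocates no intermediate lists.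
import Mathlib
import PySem

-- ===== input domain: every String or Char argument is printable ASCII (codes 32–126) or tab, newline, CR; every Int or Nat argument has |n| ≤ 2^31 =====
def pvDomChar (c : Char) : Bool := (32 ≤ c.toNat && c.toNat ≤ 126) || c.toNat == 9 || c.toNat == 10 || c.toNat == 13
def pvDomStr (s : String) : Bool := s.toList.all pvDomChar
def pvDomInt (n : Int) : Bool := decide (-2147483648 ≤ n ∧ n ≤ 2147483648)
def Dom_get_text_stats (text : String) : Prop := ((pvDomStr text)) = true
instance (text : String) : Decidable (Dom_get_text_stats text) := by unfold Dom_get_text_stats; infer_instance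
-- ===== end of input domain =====

-- B replaces A's three list-building passes by a single counting scan with two boolean flags (alternative decomposition, not measured faster in Python).

-- ===== PORT A =====
def get_text_stats (text : String) : List (String × Int) :=
  -- text.split('\n'): sep is the nonempty literal "\n", so split? is always `some`; the [] default is unreachable
  let lines := (PySem.Str.split? text "\n").getD []
  let words := PySem.Str.split₀ text
  [("char_count", PySem.Str.len text),
   ("word_count", PySem.List.len words),
   ("line_count", PySem.List.len lines),
   -- `if line.strip()`: a string is truthy iff nonempty
   ("non_empty_lines", PySem.List.len (lines.filter (fun line => decide (PySem.Str.len (PySem.Str.strip line) ≠ 0))))]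

-- ===== PORT B =====
-- one loop iteration of Source B: state = (word_count, line_count, non_empty_lines, prev_space, line_has_content)
def pvStep (st : Int × Int × Int × Bool × Bool) (c : Char) : Int × Int × Int × Bool × Bool :=
  let (w, lc, ne, ps, lh) := st
  let sp := PySem.Chars.isspace c
  let w := if !sp && ps then w + 1 else w
  let lh := if !sp then true else lh
  let ps := sp
  if c = '\n' then (w, lc + 1, if lh then ne + 1 else ne, ps, false)
  else (w, lc, ne, ps, lh)

def get_text_stats_alt (text : String) : List (String × Int) :=
  let (w, lc, ne, _ps, lh) := text.toList.foldl pvStep (0, 1, 0, true, false)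
  let ne := if lh then ne + 1 else ne
  [("char_count", PySem.Str.len text),
   ("word_count", w),
   ("line_count", lc),
   ("non_empty_lines", ne)]

-- ===== PRECONDITION & SPEC =====
def Spec_get_text_stats (text : String) (out : List (String × Int)) : Prop := out = get_text_stats_alt text
instance (text : String) (out : List (String × Int)) : Decidable (Spec_get_text_stats text out) := by unfold Spec_get_text_stats; infer_instance

-- ===== CLAIM (what is proved, stated in full; the proofs are below) =====
def Claim_equal_get_text_stats : Prop := ∀ (text : String), Dom_get_text_stats text → Spec_get_text_stats text (get_text_stats text)

-- ===== LEMMAS AND PROOFS =====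

-- spec recursions for the four scan counters of B
def pvWgo : List Char → Bool → Int
  | [], _ => 0
  | c :: cs, ps => (if !PySem.Chars.isspace c && ps then 1 else 0) + pvWgo cs (PySem.Chars.isspace c)

def pvNgo : List Char → Bool → Int
  | [], _ => 0
  | c :: cs, lh =>
    if c = '\n' then (if lh then 1 else 0) + pvNgo cs false
    else pvNgo cs (lh || !PySem.Chars.isspace c)

def pvLhF : List Char → Bool → Bool
  | [], lh => lh
  | c :: cs, lh => if c = '\n' then pvLhF cs false else pvLhF cs (lh || !PySem.Chars.isspace c)

def pvPsF : List Char → Bool → Bool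
  | [], ps => ps
  | c :: cs, _ => pvPsF cs (PySem.Chars.isspace c)

lemma pvFoldl_pvStep (cs : List Char) : ∀ (w lc ne : Int) (ps lh : Bool),
    cs.foldl pvStep (w, lc, ne, ps, lh) =
      (w + pvWgo cs ps, lc + (cs.count '\n' : Int), ne + pvNgo cs lh, pvPsF cs ps, pvLhF cs lh) := by
  induction cs with
  | nil => intro w lc ne ps lh; simp [pvWgo, pvNgo, pvPsF, pvLhF]
  | cons c cs ih =>
    intro w lc ne ps lh
    simp only [List.foldl_cons, pvStep]
    by_cases hn : c = '\n'
    · subst hn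
      have hs : PySem.Chars.isspace '\n' = true := by decide
      simp [ih, pvWgo, pvNgo, pvPsF, pvLhF, hs, List.count_cons]
      constructor
      · ring
      · split_ifs <;> ring
    · simp only [hn, if_neg hn, ih]
      have hcnt : ((c :: cs).count '\n' : Int) = (cs.count '\n' : Int) := by
        simp [List.count_cons, hn]
      by_cases hsp : PySem.Chars.isspace c = true
      · simp [pvWgo, pvNgo, pvPsF, pvLhF, hsp, hn, hcnt]
      · simp only [Bool.not_eq_true] at hsp
        by_cases hps : ps = true <;>
          simp [pvWgo, pvNgo, pvPsF, pvLhF, hsp, hn, hps] <;> ring_nf <;>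
          simp [add_comm, add_left_comm]

-- a stripped line is empty iff the line is all whitespace
lemma pvStrip_eq_nil_iff (l : List Char) :
    PySem.Chars.strip l = [] ↔ ∀ c ∈ l, PySem.Chars.isspace c = true := by
  unfold PySem.Chars.strip PySem.Chars.rstrip PySem.Chars.lstrip
  constructor
  · intro h c hc
    rw [List.reverse_eq_nil_iff, List.dropWhile_eq_nil_iff] at h
    rw [← List.takeWhile_append_dropWhile (p := PySem.Chars.isspace) (l := l)] at hc
    rcases List.mem_append.mp hc with h1 | h1
    · exact List.mem_takeWhile_imp h1
    · exact h c (List.mem_reverse.mpr h1)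
  · intro h
    have h1 : List.dropWhile PySem.Chars.isspace l = [] := by
      rw [List.dropWhile_eq_nil_iff]; intro x hx; exact h x hx
    simp [h1]

-- word count: split₀ has pvWgo-many pieces
lemma pvSplit₀_go_len (cs : List Char) : ∀ (cur : List Char) (acc : List (List Char)),
    ((PySem.Chars.split₀.go cs cur acc).length : Int) =
      acc.length + (if cur.isEmpty then 0 else 1) + pvWgo cs cur.isEmpty := by
  induction cs with
  | nil =>
    intro cur acc
    by_cases h : cur.isEmpty <;> simp [PySem.Chars.split₀.go, h, pvWgo]
  | cons c cs ih =>
    intro cur acc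
    by_cases hsp : PySem.Chars.isspace c = true
    · by_cases hc : cur.isEmpty <;>
        simp [PySem.Chars.split₀.go, hsp, hc, ih, pvWgo] <;> ring
    · simp only [Bool.not_eq_true] at hsp
      by_cases hc : cur.isEmpty <;>
        simp [PySem.Chars.split₀.go, hsp, hc, ih, pvWgo] <;> ring

-- line count: splitOn '\n' has (count '\n' + 1) pieces
lemma pvSplitOn_go_len (fuel : Nat) : ∀ (l cur : List Char) (acc : List (List Char)),
    l.length < fuel →
    ((PySem.Chars.splitOn.go ['\n'] fuel l cur acc).length : Int) =
      acc.length + (l.count '\n' : Int) + 1 := by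
  induction fuel with
  | zero => intro l cur acc h; omega
  | succ fuel ih =>
    intro l cur acc h
    match l with
    | [] => simp [PySem.Chars.splitOn.go]
    | c :: rest =>
      by_cases hn : c = '\n'
      · have hp : List.isPrefixOf ['\n'] (c :: rest) = true := by
          subst hn; simp [List.isPrefixOf]
        simp only [PySem.Chars.splitOn.go, hp, if_true]
        rw [ih _ _ _ (by simp at h ⊢; omega)]
        simp [List.count_cons, hn]
        ring
      · have hp : List.isPrefixOf ['\n'] (c :: rest) = false := by
          simp [List.isPrefixOf]; exact fun hh => absurd hh.symm hn
        simp only [PySem.Chars.splitOn.go, hp]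
        rw [if_neg (by simp [hp])]
        rw [ih _ _ _ (by simp at h ⊢; omega)]
        simp [List.count_cons, hn]

-- the non-empty-line predicate, at the Chars level
def pvP (l : List Char) : Bool := decide ((PySem.Chars.strip l).length ≠ 0)

lemma pvP_eq (l : List Char) : pvP l = l.any (fun c => !PySem.Chars.isspace c) := by
  by_cases h : ∀ c ∈ l, PySem.Chars.isspace c = true
  · have hs : PySem.Chars.strip l = [] := (pvStrip_eq_nil_iff l).mpr h
    have ha : l.any (fun c => !PySem.Chars.isspace c) = false :=
      List.any_eq_false.mpr (fun c hc => by simp [h c hc])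
    simp [pvP, hs, ha]
  · have hs : PySem.Chars.strip l ≠ [] := fun hh => h ((pvStrip_eq_nil_iff l).mp hh)
    push_neg at h
    obtain ⟨c, hc, hcs⟩ := h
    have ha : l.any (fun c => !PySem.Chars.isspace c) = true :=
      List.any_eq_true.mpr ⟨c, hc, by simp [hcs]⟩
    have hlen : (PySem.Chars.strip l).length ≠ 0 := by
      simpa [List.length_eq_zero_iff] using hs
    simp [pvP, ha, hlen]

-- pvNgoF = pvNgo on the completed lines plus the final line_has_content check
def pvNgoF : List Char → Bool → Int
  | [], lh => if lh then 1 else 0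
  | c :: cs, lh =>
    if c = '\n' then (if lh then 1 else 0) + pvNgoF cs false
    else pvNgoF cs (lh || !PySem.Chars.isspace c)

lemma pvNgoF_eq (cs : List Char) : ∀ lh : Bool,
    pvNgoF cs lh = pvNgo cs lh + (if pvLhF cs lh then 1 else 0) := by
  induction cs with
  | nil => intro lh; simp [pvNgoF, pvNgo, pvLhF]
  | cons c cs ih =>
    intro lh
    by_cases hn : c = '\n' <;> simp [pvNgoF, pvNgo, pvLhF, hn, ih] <;> ring

-- non-empty-line count: countP over splitOn '\n' equals pvNgoF
lemma pvSplitOn_go_countP (fuel : Nat) : ∀ (l cur : List Char) (acc : List (List Char)),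
    l.length < fuel →
    (((PySem.Chars.splitOn.go ['\n'] fuel l cur acc).countP pvP) : Int) =
      acc.countP pvP + pvNgoF l (cur.any (fun c => !PySem.Chars.isspace c)) := by
  induction fuel with
  | zero => intro l cur acc h; omega
  | succ fuel ih =>
    intro l cur acc h
    match l with
    | [] =>
      show (((cur.reverse :: acc).reverse.countP pvP : Nat) : Int) = _
      rw [List.countP_reverse, List.countP_cons, pvP_eq, List.any_reverse]
      simp only [pvNgoF]
      by_cases hcur : cur.any (fun c => !PySem.Chars.isspace c) = true <;> simp [hcur]
    | c :: rest =>
      by_cases hn : c = '\n'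
      · have hp : List.isPrefixOf ['\n'] (c :: rest) = true := by
          subst hn; simp [List.isPrefixOf]
        simp only [PySem.Chars.splitOn.go, hp, if_true]
        rw [ih _ _ _ (by simp at h ⊢; omega)]
        rw [List.countP_cons, pvP_eq, List.any_reverse]
        simp only [pvNgoF, if_pos hn]
        by_cases hcur : cur.any (fun c => !PySem.Chars.isspace c) = true <;> simp [hcur] <;> ring
      · have hp : List.isPrefixOf ['\n'] (c :: rest) = false := by
          simp [List.isPrefixOf]; exact fun hh => absurd hh.symm hn
        simp only [PySem.Chars.splitOn.go, hp, Bool.false_eq_true, if_false]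
        rw [ih _ _ _ (by simp at h ⊢; omega)]
        simp [pvNgoF, hn, List.any_cons, Bool.or_comm]

-- ===== VERDICT (by name: the statement is the Claim_ definition above) =====
theorem get_text_stats_spec : Claim_equal_get_text_stats := by
  intro text _
  unfold Spec_get_text_stats get_text_stats get_text_stats_alt
  rw [pvFoldl_pvStep]
  rw [show PySem.Str.split? text "\n" = some (List.map String.ofList (PySem.Chars.splitOn text.toList ['\n'])) from by
    simp [PySem.Str.split?, PySem.Chars.split?]]
  have hw : PySem.List.len (PySem.Str.split₀ text) = pvWgo text.toList true := by
    have h0 := pvSplit₀_go_len text.toList [] []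
    simp only [List.isEmpty_nil, List.length_nil, if_true] at h0
    simp [PySem.List.len_eq, PySem.Str.split₀, PySem.Chars.split₀, h0]
  have hl : PySem.List.len (List.map String.ofList (PySem.Chars.splitOn text.toList ['\n']))
      = 1 + (text.toList.count '\n' : Int) := by
    have h0 := pvSplitOn_go_len (text.toList.length + 1) text.toList [] [] (by omega)
    simp only [List.length_nil, Nat.cast_zero, zero_add] at h0
    rw [PySem.List.len_eq, List.length_map, PySem.Chars.splitOn, h0]
    ring
  have hne : PySem.List.len ((List.map String.ofList (PySem.Chars.splitOn text.toList ['\n'])).filter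
        (fun line => decide (PySem.Str.len (PySem.Str.strip line) ≠ 0)))
      = pvNgo text.toList false + (if pvLhF text.toList false then 1 else 0) := by
    have h0 := pvSplitOn_go_countP (text.toList.length + 1) text.toList [] [] (by omega)
    simp only [List.countP_nil, List.any_nil, Nat.cast_zero, zero_add] at h0
    have hp : ((fun line => decide (PySem.Str.len (PySem.Str.strip line) ≠ 0)) ∘ String.ofList) = pvP := by
      funext l
      simp [Function.comp, pvP, PySem.Str.len, PySem.Str.strip, String.toList_ofList]
    rw [PySem.List.len_eq, ← List.countP_eq_length_filter, List.countP_map, hp,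
        PySem.Chars.splitOn, h0, pvNgoF_eq]
  simp only [Option.getD_some]
  rw [hw, hl, hne]
  by_cases hlh : pvLhF text.toList false = true <;> simp [hlh]
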